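-- pv_equiv track=rewrite | github.com/lindseysbrown/evidence_accumulation_through_sequences | Figure4/psychometrics_4B.py | rebin
-- ===== SOURCE A (Python) =====
-- def rebin(p):
--     pnew= {}
--     for i in range(-14, 14, 3):
--         pnew[i] = []
--         try:
--             pnew[i] = pnew[i]+p[i-1]
--         except:
--             pnew[i] = pnew[i]
--         try:
--             pnew[i] = pnew[i]+p[i]
--         except:
--             pnew[i] = pnew[i]
--         try:
--             pnew[i] = pnew[i]+p[i+1]
--         except:
--             pnew[i] = pnew[i]
--         if len(pnew[i])==0:
--             pnew.pop(i)
--     return pnew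
-- ===== SOURCE B (Python) =====
-- def rebin(p):
--     out = {}
--     for k in sorted(p):
--         r = k % 3
--         c = k + 1 if r == 0 else (k if r == 1 else k - 1)
--         if p[k] and -14 <= c <= 13:
--             out[c] = out.get(c, []) + p[k]
--     return out
-- ===== Notes on version B (the rewrite author's own statement) =====
-- stated objective: alternative
-- what changed: A builds each of the ten coarse bins by probing the three fixed keys i-1,i,i+1 per bin centre; B makes a single group-by pass over the sorted keys, computing each key's coarse centre arithmetically and appending its list to that centre's bucket, keeping only non-empty buckets.
import Mathlib
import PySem

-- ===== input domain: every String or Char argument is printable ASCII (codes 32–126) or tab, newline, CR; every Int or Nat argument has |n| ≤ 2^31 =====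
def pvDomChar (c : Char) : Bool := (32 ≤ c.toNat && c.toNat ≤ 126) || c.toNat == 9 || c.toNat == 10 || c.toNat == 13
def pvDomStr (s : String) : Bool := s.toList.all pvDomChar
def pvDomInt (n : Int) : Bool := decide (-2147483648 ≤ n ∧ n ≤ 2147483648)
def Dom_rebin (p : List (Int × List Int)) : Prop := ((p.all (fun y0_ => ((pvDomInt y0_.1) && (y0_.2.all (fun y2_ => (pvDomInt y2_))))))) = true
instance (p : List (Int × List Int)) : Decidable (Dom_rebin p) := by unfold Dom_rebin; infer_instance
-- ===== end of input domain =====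

-- B replaces A's fixed scan of three keys per coarse bin by a single group-by pass over the
-- sorted keys, computing each key's coarse center; objective: alternative decomposition (not faster).

-- ===== PORT A =====
-- A's `p` is a dict; it arrives as its items list, looked up with first-match semantics via Dict.mk.
def rebin (p : List (Int × List Int)) : List (Int × List Int) :=
  let pd := PySem.Dict.mk p
  ((PySem.List.pyRange (-14) 14 3).foldl (fun pnew i =>
      let d1 := pnew.insert i ([] : List Int)
      -- try: pnew[i] = pnew[i] + p[i-1]  (KeyError caught ⇒ no-op); pnew[i] is present, getD is exact
      let d2 := match pd.get? (i - 1) with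
        | some v => d1.insert i (d1.getD i [] ++ v)
        | none => d1
      let d3 := match pd.get? i with
        | some v => d2.insert i (d2.getD i [] ++ v)
        | none => d2
      let d4 := match pd.get? (i + 1) with
        | some v => d3.insert i (d3.getD i [] ++ v)
        | none => d3
      -- pnew.pop(i): key i is present at this point, so pop = erase
      if (d4.getD i []).length == 0 then d4.erase i else d4)
    PySem.Dict.empty).items

-- ===== PORT B =====
-- `for k in sorted(p)`: the dict's distinct keys (first occurrences, PySem.List.dedup) in ascending order.
def rebin_alt (p : List (Int × List Int)) : List (Int × List Int) :=
  let pd := PySem.Dict.mk p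
  ((PySem.List.sorted (PySem.List.dedup (p.map Prod.fst)) (fun k => k) false).foldl
    (fun out k =>
      let r := PySem.Int.mod k 3
      let c := if r = 0 then k + 1 else if r = 1 then k else k - 1
      let v := pd.getD k []   -- p[k]: k is a key of p, so present; getD is exact
      if v ≠ [] ∧ -14 ≤ c ∧ c ≤ 13 then out.insert c (out.getD c [] ++ v) else out)
    PySem.Dict.empty).items

-- ===== PRECONDITION & SPEC =====
def Spec_rebin (p : List (Int × List Int)) (out : List (Int × List Int)) : Prop := out = rebin_alt p
instance (p : List (Int × List Int)) (out : List (Int × List Int)) : Decidable (Spec_rebin p out) := by unfold Spec_rebin; infer_instance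

-- ===== CLAIM (what is proved, stated in full; the proofs are below) =====
def Claim_equal_rebin : Prop := ∀ (p : List (Int × List Int)), Dom_rebin p → Spec_rebin p (rebin p)

-- ===== LEMMAS AND PROOFS =====

-- first-match lookup in p, defaulted to []
def pvGet (p : List (Int × List Int)) (k : Int) : List Int := ((PySem.Dict.mk p).get? k).getD []

-- the contents A gives to bin c
def pvG (p : List (Int × List Int)) (c : Int) : List Int := pvGet p (c - 1) ++ pvGet p c ++ pvGet p (c + 1)

def pvCenters : List Int := [-14, -11, -8, -5, -2, 1, 4, 7, 10, 13]

def pvCenter (k : Int) : Int :=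
  if PySem.Int.mod k 3 = 0 then k + 1 else if PySem.Int.mod k 3 = 1 then k else k - 1

def pvKs (p : List (Int × List Int)) : List Int :=
  PySem.List.sorted (PySem.List.dedup (p.map Prod.fst)) (fun k => k) false

def pvStepA (p : List (Int × List Int)) (pnew : PySem.Dict Int (List Int)) (i : Int) :
    PySem.Dict Int (List Int) :=
  let pd := PySem.Dict.mk p
  let d1 := pnew.insert i ([] : List Int)
  let d2 := match pd.get? (i - 1) with
    | some v => d1.insert i (d1.getD i [] ++ v)
    | none => d1
  let d3 := match pd.get? i with
    | some v => d2.insert i (d2.getD i [] ++ v)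
    | none => d2
  let d4 := match pd.get? (i + 1) with
    | some v => d3.insert i (d3.getD i [] ++ v)
    | none => d3
  if (d4.getD i []).length == 0 then d4.erase i else d4

def pvStepB (p : List (Int × List Int)) (out : PySem.Dict Int (List Int)) (k : Int) :
    PySem.Dict Int (List Int) :=
  let pd := PySem.Dict.mk p
  let r := PySem.Int.mod k 3
  let c := if r = 0 then k + 1 else if r = 1 then k else k - 1
  let v := pd.getD k []
  if v ≠ [] ∧ -14 ≤ c ∧ c ≤ 13 then out.insert c (out.getD c [] ++ v) else out

def pvQ (p : List (Int × List Int)) (k : Int) : Bool :=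
  decide (pvGet p k ≠ [] ∧ -14 ≤ pvCenter k ∧ pvCenter k ≤ 13)

def pvIns (p : List (Int × List Int)) (out : PySem.Dict Int (List Int)) (k : Int) :
    PySem.Dict Int (List Int) :=
  out.insert (pvCenter k) (out.getD (pvCenter k) [] ++ pvGet p k)

lemma rebin_eq_foldA (p : List (Int × List Int)) :
    rebin p = (pvCenters.foldl (pvStepA p) PySem.Dict.empty).items := by
  have h : PySem.List.pyRange (-14) 14 3 = pvCenters := by decide
  unfold rebin
  rw [h]
  rfl

lemma rebin_alt_eq_foldB (p : List (Int × List Int)) :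
    rebin_alt p = ((pvKs p).foldl (pvStepB p) PySem.Dict.empty).items := rfl

-- ---- A side ----

lemma erase_insert_fresh (d : PySem.Dict Int (List Int)) (i : Int) (v : List Int)
    (h : d.contains i = false) : (d.insert i v).erase i = d := by
  apply PySem.Dict.ext
  have hmem : ∀ q ∈ d.items, ¬ (q.1 = i) := by
    intro q hq hqi
    have : i ∈ d.keys := by
      simp only [PySem.Dict.keys]; exact List.mem_map.2 ⟨q, hq, hqi⟩
    rw [← PySem.Dict.contains_iff_mem_keys] at this; simp [h] at this
  simp [PySem.Dict.erase, PySem.Dict.items_insert_of_not_contains _ _ h, List.filter_append]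
  intro a b hab; exact hmem (a, b) hab

lemma stepA_fresh (p : List (Int × List Int)) (d : PySem.Dict Int (List Int)) (i : Int)
    (h : d.contains i = false) :
    pvStepA p d i = if pvG p i = [] then d else PySem.Dict.mk (d.items ++ [(i, pvG p i)]) := by
  have key : pvStepA p d i
      = if (pvG p i).length == 0 then (d.insert i (pvG p i)).erase i else d.insert i (pvG p i) := by
    unfold pvStepA pvG pvGet
    rcases h1 : (PySem.Dict.mk p).get? (i-1) with _|v1 <;>
      rcases h2 : (PySem.Dict.mk p).get? i with _|v2 <;>
      rcases h3 : (PySem.Dict.mk p).get? (i+1) with _|v3 <;>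
      simp [h1, h2, h3, PySem.Dict.insert_insert_self, PySem.Dict.getD_insert_self]
  rw [key]
  by_cases hg : pvG p i = []
  · simp [hg, erase_insert_fresh _ _ _ h]
  · simp [hg, List.length_eq_zero_iff, PySem.Dict.ext_iff, PySem.Dict.items_insert_of_not_contains _ _ h]

lemma foldA (p : List (Int × List Int)) : ∀ (cs : List Int) (d : PySem.Dict Int (List Int)),
    cs.Nodup → (∀ c ∈ cs, d.contains c = false) →
    (cs.foldl (pvStepA p) d).items
      = d.items ++ cs.flatMap (fun c => if pvG p c = [] then [] else [(c, pvG p c)]) := by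
  intro cs
  induction cs with
  | nil => simp
  | cons c cs ih =>
    intro d hnd hf
    rw [List.foldl_cons, stepA_fresh p d c (hf c (by simp))]
    by_cases hg : pvG p c = []
    · rw [if_pos hg, ih d hnd.of_cons (fun c' hc' => hf c' (List.mem_cons_of_mem _ hc'))]
      simp [hg]
    · rw [if_neg hg]
      have hfresh : ∀ c' ∈ cs, (PySem.Dict.mk (d.items ++ [(c, pvG p c)])).contains c' = false := by
        intro c' hc'
        by_contra hcon
        have : c' ∈ (PySem.Dict.mk (d.items ++ [(c, pvG p c)])).keys := by
          rw [← PySem.Dict.contains_iff_mem_keys]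
          revert hcon; cases (PySem.Dict.mk (d.items ++ [(c, pvG p c)])).contains c' <;> simp
        rw [PySem.Dict.keys_mk] at this
        simp only [List.map_append, List.mem_append, List.map_cons] at this
        rcases this with h | h
        · have : c' ∈ d.keys := by simp only [PySem.Dict.keys]; exact h
          rw [← PySem.Dict.contains_iff_mem_keys] at this
          rw [hf c' (List.mem_cons_of_mem _ hc')] at this; exact absurd this (by simp)
        · simp at h
          exact (List.nodup_cons.1 hnd).1 (h ▸ hc')
      rw [ih _ hnd.of_cons hfresh]
      simp [hg, List.append_assoc]

lemma flatMap_if_eq_filter_map (p : List (Int × List Int)) : ∀ l : List Int,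
    l.flatMap (fun c => if pvG p c = [] then [] else [(c, pvG p c)])
      = (l.filter (fun c => decide (pvG p c ≠ []))).map (fun c => (c, pvG p c)) := by
  intro l
  induction l with
  | nil => simp
  | cons c l ih =>
    by_cases hg : pvG p c = []
    · rw [List.flatMap_cons, List.filter_cons_of_neg (by simp [hg]), if_pos hg, ih]
      simp
    · rw [List.flatMap_cons, List.filter_cons_of_pos (by simp [hg]), if_neg hg, ih]
      simp

lemma rebin_char (p : List (Int × List Int)) :
    rebin p = (pvCenters.filter (fun c => decide (pvG p c ≠ []))).map (fun c => (c, pvG p c)) := by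
  rw [rebin_eq_foldA,
    foldA p pvCenters PySem.Dict.empty (by decide) (fun c _ => PySem.Dict.contains_empty c),
    flatMap_if_eq_filter_map]
  rfl

-- ---- B side ----

lemma stepB_eq (p : List (Int × List Int)) (out : PySem.Dict Int (List Int)) (k : Int) :
    pvStepB p out k = if pvQ p k then pvIns p out k else out := by
  simp only [pvQ, decide_eq_true_eq]
  unfold pvStepB pvIns
  exact if_congr Iff.rfl rfl rfl

lemma foldB_filter (p : List (Int × List Int)) : ∀ (l : List Int) (d : PySem.Dict Int (List Int)),
    l.foldl (pvStepB p) d = (l.filter (pvQ p)).foldl (pvIns p) d := by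
  intro l
  induction l with
  | nil => intro d; rfl
  | cons k l ih =>
    intro d
    rw [List.foldl_cons, stepB_eq]
    by_cases h : pvQ p k = true
    · rw [if_pos h, List.filter_cons_of_pos h, List.foldl_cons, ih]
    · rw [if_neg (by simpa using h), List.filter_cons_of_neg (by simpa using h), ih]

lemma getD_ins_fold (p : List (Int × List Int)) : ∀ (l : List Int) (d : PySem.Dict Int (List Int)) (c : Int),
    ((l.foldl (pvIns p) d).getD c [])
      = d.getD c [] ++ ((l.filter (fun k => pvCenter k == c)).map (pvGet p)).flatten := by
  intro l
  induction l with
  | nil => simp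
  | cons k l ih =>
    intro d c
    rw [List.foldl_cons]
    by_cases h : pvCenter k = c
    · rw [List.filter_cons_of_pos (by simp [h]), ih]
      simp [pvIns, h, PySem.Dict.getD_insert_self]
    · rw [List.filter_cons_of_neg (by simp [h]), ih]
      have : (pvIns p d k).getD c [] = d.getD c [] := by
        simp [pvIns, PySem.Dict.getD_insert_of_ne _ _ _ (fun hc => h hc.symm)]
      rw [this]

lemma keys_ins_fold (p : List (Int × List Int)) (l : List Int) :
    ((l.foldl (pvIns p) PySem.Dict.empty).keys) = PySem.List.dedup (l.map pvCenter) := by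
  have h := PySem.Dict.keys_foldl_insert_key l pvCenter
      (fun d k => d.getD (pvCenter k) [] ++ pvGet p k) PySem.Dict.empty
  unfold pvIns
  rw [h]
  rfl

lemma nodup_keys_ins_fold (p : List (Int × List Int)) (l : List Int) :
    ((l.foldl (pvIns p) PySem.Dict.empty).keys).Nodup :=
  PySem.Dict.nodup_keys_foldl_insert_key l pvCenter _ _ PySem.Dict.nodup_keys_empty

-- ---- arithmetic and order facts ----

lemma pvCenter_eq (k : Int) :
    pvCenter k = if k % 3 = 0 then k + 1 else if k % 3 = 1 then k else k - 1 := by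
  simp [pvCenter]

lemma mem_pvCenters_iff (c : Int) : c ∈ pvCenters ↔ -14 ≤ c ∧ c ≤ 13 ∧ c % 3 = 1 := by
  simp [pvCenters]; omega

lemma pvCenter_mono {a b : Int} (h : a ≤ b) : pvCenter a ≤ pvCenter b := by
  rw [pvCenter_eq, pvCenter_eq]; split_ifs <;> omega

lemma pvCenter_mod (k : Int) : pvCenter k % 3 = 1 := by
  rw [pvCenter_eq]; split_ifs <;> omega

lemma pvCenter_eq_iff {c : Int} (hc : c % 3 = 1) (k : Int) :
    pvCenter k = c ↔ (k = c - 1 ∨ k = c ∨ k = c + 1) := by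
  rw [pvCenter_eq]; split_ifs <;> omega

lemma eq_of_pairwise_lt_mem_iff {l₁ l₂ : List Int} (h₁ : l₁.Pairwise (· < ·))
    (h₂ : l₂.Pairwise (· < ·)) (hm : ∀ x, x ∈ l₁ ↔ x ∈ l₂) : l₁ = l₂ := by
  have hp : l₁.Perm l₂ :=
    (List.perm_ext_iff_of_nodup (h₁.imp (fun h => Int.ne_of_lt h))
      (h₂.imp (fun h => Int.ne_of_lt h))).2 hm
  exact List.Perm.eq_of_pairwise (le := (· < ·))
    (fun a b _ _ hab hba => absurd hba (by omega)) h₁ h₂ hp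

lemma flatten_filter_of_nil {q : Int → Bool} {f : Int → List Int} :
    ∀ l : List Int, (∀ j ∈ l, q j = false → f j = []) →
    ((l.filter q).map f).flatten = (l.map f).flatten := by
  intro l
  induction l with
  | nil => simp
  | cons j l ih =>
    intro h
    by_cases hq : q j = true
    · rw [List.filter_cons_of_pos hq]
      simp [ih (fun j hj => h j (List.mem_cons_of_mem _ hj))]
    · rw [List.filter_cons_of_neg (by simpa using hq)]
      simp [ih (fun j hj => h j (List.mem_cons_of_mem _ hj)),
        h j (by simp) (by simpa using hq)]

lemma pairwise_le_nodup_lt {l : List Int} (h : l.Pairwise (· ≤ ·)) (hn : l.Nodup) :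
    l.Pairwise (· < ·) :=
  (h.and hn).imp (fun hx => lt_of_le_of_ne hx.1 hx.2)

lemma ks_pairwise_lt (p : List (Int × List Int)) : (pvKs p).Pairwise (· < ·) := by
  apply pairwise_le_nodup_lt
  · exact PySem.List.sorted_pairwise _ _
  · exact ((PySem.List.sorted_perm _ _ false).nodup_iff).2 (PySem.List.nodup_dedup _)

lemma mem_ks (p : List (Int × List Int)) (k : Int) : k ∈ pvKs p ↔ k ∈ p.map Prod.fst := by
  rw [pvKs, PySem.List.mem_sorted, PySem.List.mem_dedup]

lemma pvGet_eq_nil_of_not_mem {p : List (Int × List Int)} {j : Int}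
    (h : j ∉ p.map Prod.fst) : pvGet p j = [] := by
  unfold pvGet
  rw [(PySem.Dict.get?_eq_none_iff_not_mem_keys _ _).2 (by rwa [PySem.Dict.keys_mk])]
  rfl

lemma mem_of_pvGet_ne_nil {p : List (Int × List Int)} {j : Int}
    (h : pvGet p j ≠ []) : j ∈ p.map Prod.fst := by
  by_contra hc; exact h (pvGet_eq_nil_of_not_mem hc)

lemma foldl_add_exists : ∀ (l : List Int) (s : PySem.Set Int),
    ∃ t : List Int, List.foldl PySem.Set.add s l = s ++ t ∧ t.Sublist l := by
  intro l
  induction l with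
  | nil => intro s; exact ⟨[], by simp, by simp⟩
  | cons x l ih =>
    intro s
    rw [List.foldl_cons]
    by_cases h : s.contains x = true
    · have hadd : PySem.Set.add s x = s := by unfold PySem.Set.add; rw [if_pos h]
      rw [hadd]
      obtain ⟨t, h1, h2⟩ := ih s
      exact ⟨t, h1, h2.cons _⟩
    · have hadd : PySem.Set.add s x = s ++ [x] := by unfold PySem.Set.add; rw [if_neg h]
      rw [hadd]
      obtain ⟨t, h1, h2⟩ := ih (s ++ [x])
      exact ⟨x :: t, by rw [h1]; simp, h2.cons₂ _⟩

lemma dedup_sublist (l : List Int) : (PySem.List.dedup l).Sublist l := by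
  obtain ⟨t, h1, h2⟩ := foldl_add_exists l PySem.Set.empty
  have h : PySem.List.dedup l = t := by
    rw [PySem.List.dedup, PySem.Set.ofList, h1]; rfl
  rw [h]; exact h2

lemma filtered_pairwise (p : List (Int × List Int)) :
    (((pvKs p).filter (pvQ p))).Pairwise (· < ·) :=
  (ks_pairwise_lt p).filter _

lemma keys_eq (p : List (Int × List Int)) :
    PySem.List.dedup (((pvKs p).filter (pvQ p)).map pvCenter)
      = pvCenters.filter (fun c => decide (pvG p c ≠ [])) := by
  apply eq_of_pairwise_lt_mem_iff
  · apply pairwise_le_nodup_lt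
    · have hm : (((pvKs p).filter (pvQ p)).map pvCenter).Pairwise (· ≤ ·) :=
        List.Pairwise.map pvCenter (fun a b hab => pvCenter_mono (le_of_lt hab))
          (filtered_pairwise p)
      exact hm.sublist (dedup_sublist _)
    · exact PySem.List.nodup_dedup _
  · exact List.Pairwise.filter _ (by decide)
  · intro c
    rw [PySem.List.mem_dedup, List.mem_map]
    constructor
    · rintro ⟨k, hk, rfl⟩
      obtain ⟨hkmem, hkQ⟩ := List.mem_filter.1 hk
      rw [pvQ, decide_eq_true_eq] at hkQ
      obtain ⟨hne, hlo, hhi⟩ := hkQ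
      rw [List.mem_filter, decide_eq_true_eq]
      refine ⟨(mem_pvCenters_iff _).2 ⟨hlo, hhi, pvCenter_mod k⟩, ?_⟩
      have hk3 := (pvCenter_eq_iff (pvCenter_mod k) k).1 rfl
      intro hnil
      rw [pvG, List.append_eq_nil_iff, List.append_eq_nil_iff] at hnil
      rcases hk3 with h | h | h <;> rw [← h] at hnil <;> exact hne (by tauto)
    · intro hcmem
      obtain ⟨hc, hg⟩ := List.mem_filter.1 hcmem
      rw [decide_eq_true_eq] at hg
      obtain ⟨hlo, hhi, h3⟩ := (mem_pvCenters_iff c).1 hc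
      have h3way : pvGet p (c-1) ≠ [] ∨ pvGet p c ≠ [] ∨ pvGet p (c+1) ≠ [] := by
        by_contra h; push Not at h
        exact hg (by rw [pvG, h.1, h.2.1, h.2.2]; rfl)
      have pick : ∃ j, pvGet p j ≠ [] ∧ (j = c - 1 ∨ j = c ∨ j = c + 1) := by
        rcases h3way with h | h | h
        · exact ⟨c - 1, h, Or.inl rfl⟩
        · exact ⟨c, h, Or.inr (Or.inl rfl)⟩
        · exact ⟨c + 1, h, Or.inr (Or.inr rfl)⟩
      obtain ⟨j, hj, hjc⟩ := pick
      have hcent : pvCenter j = c := (pvCenter_eq_iff h3 j).2 hjc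
      refine ⟨j, List.mem_filter.2 ⟨(mem_ks p j).2 (mem_of_pvGet_ne_nil hj), ?_⟩, hcent⟩
      rw [pvQ, decide_eq_true_eq, hcent]
      exact ⟨hj, hlo, hhi⟩

lemma content_eq (p : List (Int × List Int)) {c : Int} (hc : c ∈ pvCenters) :
    (((((pvKs p).filter (pvQ p)).filter (fun k => pvCenter k == c)).map (pvGet p)).flatten)
      = pvG p c := by
  obtain ⟨hlo, hhi, h3⟩ := (mem_pvCenters_iff c).1 hc
  have hfil : ((pvKs p).filter (pvQ p)).filter (fun k => pvCenter k == c)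
      = [c-1, c, c+1].filter (fun j => decide (j ∈ p.map Prod.fst) && decide (pvGet p j ≠ [])) := by
    apply eq_of_pairwise_lt_mem_iff
    · exact List.Pairwise.filter _ (filtered_pairwise p)
    · apply List.Pairwise.filter
      simp [List.pairwise_cons]
    · intro k
      rw [List.mem_filter, List.mem_filter, List.mem_filter]
      constructor
      · rintro ⟨⟨hkmem, hkQ⟩, hkc⟩
        rw [beq_iff_eq] at hkc
        rw [pvQ, decide_eq_true_eq] at hkQ
        have hk3 := (pvCenter_eq_iff h3 k).1 hkc
        refine ⟨by simp [hk3], ?_⟩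
        rw [Bool.and_eq_true, decide_eq_true_eq, decide_eq_true_eq]
        exact ⟨(mem_ks p k).1 hkmem, hkQ.1⟩
      · rintro ⟨hk3, hrest⟩
        rw [Bool.and_eq_true, decide_eq_true_eq, decide_eq_true_eq] at hrest
        have hk3' : k = c - 1 ∨ k = c ∨ k = c + 1 := by
          simpa using hk3
        have hcent : pvCenter k = c := (pvCenter_eq_iff h3 k).2 hk3'
        refine ⟨⟨(mem_ks p k).2 hrest.1, ?_⟩, by rw [beq_iff_eq]; exact hcent⟩
        rw [pvQ, decide_eq_true_eq, hcent]
        exact ⟨hrest.2, hlo, hhi⟩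
  rw [hfil, flatten_filter_of_nil _ ?side]
  · simp [pvG]
  · intro j _ hq
    rw [Bool.and_eq_false_iff] at hq
    rcases hq with hq | hq
    · exact pvGet_eq_nil_of_not_mem (by simpa using hq)
    · simpa using hq

lemma rebin_alt_char (p : List (Int × List Int)) :
    rebin_alt p
      = (pvCenters.filter (fun c => decide (pvG p c ≠ []))).map (fun c => (c, pvG p c)) := by
  rw [rebin_alt_eq_foldB, foldB_filter,
    PySem.Dict.items_eq_map_keys _ (nodup_keys_ins_fold p _) ([] : List Int),
    keys_ins_fold, keys_eq]
  apply List.map_congr_left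
  intro c hcmem
  have hc : c ∈ pvCenters := (List.mem_filter.1 hcmem).1
  have : (((pvKs p).filter (pvQ p)).foldl (pvIns p) PySem.Dict.empty).getD c [] = pvG p c := by
    rw [getD_ins_fold]
    simpa using content_eq p hc
  rw [this]

-- ===== VERDICT (by name: the statement is the Claim_ definition above) =====
theorem rebin_spec : Claim_equal_rebin := by
  intro p _
  unfold Spec_rebin
  rw [rebin_char, rebin_alt_char]
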